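-- pv_equiv track=rewrite | github.com/PrinceSinghhub/GFG-Questions | Water the plants.py | min_sprinklers
-- ===== SOURCE A (Python) =====
-- def min_sprinklers(gallery, n):
--     # code here
--     range_list = [[0, 0] for _ in range(n)]
--
--     for i in range(n):
--         if gallery[i] == -1:
--             continue
--         range_list[i][0] = max(0, i - gallery[i])
--         range_list[i][1] = min(n, i + gallery[i])
--
--     range_list.sort(key=lambda x: x[0])
--
--     start, i, res = 0, 0, 0
--     curr_max = -1
--
--     while start < n:
--         while i < n:
--             if range_list[i][0] > start:
--                 break
--             curr_max = max(curr_max, range_list[i][1])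
--             i += 1
--
--         if curr_max < start:
--             return -1
--
--         res += 1
--         start = curr_max + 1
--
--     return res
-- ===== SOURCE B (Python) =====
-- def min_sprinklers(gallery, n):
--     spans = []
--     for i in range(n):
--         g = gallery[i]
--         if g == -1:
--             spans.append((0, 0))
--         else:
--             spans.append((max(0, i - g), min(n, i + g)))
--     res, pos = 0, 0
--     while pos < n:
--         best = -1
--         for lo, hi in spans:
--             if lo <= pos and hi > best:
--                 best = hi
--         if best < pos:
--             return -1
--         res += 1
--         pos = best + 1
--     return res
-- ===== Notes on version B (the rewrite author's own statement) =====
-- stated objective: simpler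
-- what changed: B drops the sort and the carried pointer/curr_max state: it keeps the interval list unsorted and, at each greedy step, finds the furthest reachable end by a fresh linear scan of all intervals.
import Mathlib
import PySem

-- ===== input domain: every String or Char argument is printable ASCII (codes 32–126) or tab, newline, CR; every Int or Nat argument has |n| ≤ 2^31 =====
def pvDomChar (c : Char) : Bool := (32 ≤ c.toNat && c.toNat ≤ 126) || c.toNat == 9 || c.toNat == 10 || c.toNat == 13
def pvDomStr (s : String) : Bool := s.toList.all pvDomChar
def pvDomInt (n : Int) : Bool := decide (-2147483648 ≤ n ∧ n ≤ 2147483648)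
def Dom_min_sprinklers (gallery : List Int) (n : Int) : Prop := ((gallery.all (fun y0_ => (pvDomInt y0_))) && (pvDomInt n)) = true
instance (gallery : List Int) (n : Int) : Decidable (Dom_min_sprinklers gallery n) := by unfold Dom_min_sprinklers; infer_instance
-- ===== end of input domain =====

-- B replaces A's sort + advancing-pointer merge by a sortless greedy that rescans the
-- unsorted interval list for the furthest reachable end at each step (objective: simpler).

-- ===== PORT A =====
-- 'range_list = [[0,0] for _ in range(n)]' then the index-assignment loop
-- (gallery[i] is in range for every i in range(n) under Pre_; the getD default 0 is unreachable there)
def pvBuildA (gallery : List Int) (n : Int) : List (Int × Int) :=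
  (PySem.List.pyRange 0 n 1).foldl
    (fun rl i =>
      if PySem.List.pyGetD gallery i 0 = -1 then rl
      else rl.set i.toNat
        (max 0 (i - PySem.List.pyGetD gallery i 0), min n (i + PySem.List.pyGetD gallery i 0)))
    ((PySem.List.pyRange 0 n 1).map (fun _ => (0, 0)))

-- the inner 'while i < n: … break …' loop; the pointer i is represented by the unconsumed suffix
-- (range_list has length n, so 'i < n' is 'suffix ≠ []')
def pvInnerA (start : Int) : List (Int × Int) → Int → (List (Int × Int) × Int)
  | [], curr => ([], curr)
  | x :: rest, curr =>
    if x.1 > start then (x :: rest, curr)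
    else pvInnerA start rest (max curr x.2)

-- the outer 'while start < n' loop
def pvOuterA (n : Int) (rem : List (Int × Int)) (start res curr : Int) : Int :=
  if h : start < n then
    if h2 : (pvInnerA start rem curr).2 < start then -1
    else pvOuterA n (pvInnerA start rem curr).1 ((pvInnerA start rem curr).2 + 1) (res + 1)
           (pvInnerA start rem curr).2
  else res
termination_by (n - start).toNat
decreasing_by omega

def min_sprinklers (gallery : List Int) (n : Int) : Int :=
  pvOuterA n (PySem.List.sorted (pvBuildA gallery n) (fun x => x.1) false) 0 0 (-1)

-- ===== PORT B =====
-- 'spans.append(…)' loop of Source B (gallery[i] in range under Pre_, default 0 unreachable there)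
def pvSpansB (gallery : List Int) (n : Int) : List (Int × Int) :=
  (PySem.List.pyRange 0 n 1).foldl
    (fun acc i =>
      if PySem.List.pyGetD gallery i 0 = -1 then acc ++ [(0, 0)]
      else acc ++ [(max 0 (i - PySem.List.pyGetD gallery i 0),
                    min n (i + PySem.List.pyGetD gallery i 0))])
    []

-- 'best = -1; for lo, hi in spans: if lo <= pos and hi > best: best = hi'
def pvBestB (spans : List (Int × Int)) (pos : Int) : Int :=
  spans.foldl (fun best x => if x.1 ≤ pos ∧ x.2 > best then x.2 else best) (-1)

-- 'while pos < n' loop of Source B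
def pvSweepB (spans : List (Int × Int)) (n : Int) (pos res : Int) : Int :=
  if h : pos < n then
    if h2 : pvBestB spans pos < pos then -1
    else pvSweepB spans n (pvBestB spans pos + 1) (res + 1)
  else res
termination_by (n - pos).toNat
decreasing_by omega

def min_sprinklers_alt (gallery : List Int) (n : Int) : Int :=
  pvSweepB (pvSpansB gallery n) n 0 0

-- ===== PRECONDITION & SPEC =====
-- Pre_ excludes exactly the inputs where A raises IndexError: gallery[i] with n > len(gallery)
def Pre_min_sprinklers (gallery : List Int) (n : Int) : Prop := n ≤ (gallery.length : Int)
instance (gallery : List Int) (n : Int) : Decidable (Pre_min_sprinklers gallery n) := by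
  unfold Pre_min_sprinklers; infer_instance

def pvWitness_min_sprinklers : List Int × Int := ([2, -1, 0], 3)

def Spec_min_sprinklers (gallery : List Int) (n : Int) (out : Int) : Prop := out = min_sprinklers_alt gallery n
instance (gallery : List Int) (n : Int) (out : Int) : Decidable (Spec_min_sprinklers gallery n out) := by unfold Spec_min_sprinklers; infer_instance

-- ===== CLAIM (what is proved, stated in full; the proofs are below) =====
def Claim_equal_min_sprinklers : Prop := ∀ (gallery : List Int) (n : Int), Dom_min_sprinklers gallery n → Pre_min_sprinklers gallery n → Spec_min_sprinklers gallery n (min_sprinklers gallery n)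

-- ===== LEMMAS AND PROOFS =====

-- the interval of sprinkler i, as both programs compute it
def pvIntv (gallery : List Int) (n : Int) (i : Int) : Int × Int :=
  if PySem.List.pyGetD gallery i 0 = -1 then (0, 0)
  else (max 0 (i - PySem.List.pyGetD gallery i 0), min n (i + PySem.List.pyGetD gallery i 0))

-- the conditional running max both sweeps compute: max(-1, {hi | (lo,hi) ∈ L, lo ≤ pos})
def pvMx (L : List (Int × Int)) (pos : Int) : Int :=
  L.foldl (fun c x => if x.1 ≤ pos then max c x.2 else c) (-1)

theorem pvSpansB_eq_map (gallery : List Int) (n : Int) :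
    pvSpansB gallery n = (PySem.List.pyRange 0 n 1).map (pvIntv gallery n) := by
  unfold pvSpansB
  rw [PySem.List.foldl_congr_mem (PySem.List.pyRange 0 n 1) _
      (fun acc i => acc ++ [pvIntv gallery n i]) []
      (by
        intro acc x _
        show (if PySem.List.pyGetD gallery x 0 = -1 then acc ++ [((0:Int),(0:Int))]
              else acc ++ [(max 0 (x - PySem.List.pyGetD gallery x 0),
                            min n (x + PySem.List.pyGetD gallery x 0))])
            = acc ++ [pvIntv gallery n x]
        unfold pvIntv
        split_ifs <;> rfl)]
  simpa using PySem.List.foldl_append_singleton_eq_map (l := PySem.List.pyRange 0 n 1)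
    (f := pvIntv gallery n) (acc := [])

theorem pvBuildA_loop (gallery : List Int) (n : Int) :
    ∀ (k : Nat) (m : Int), 0 ≤ m → m ≤ n → k = (n - m).toNat →
    (PySem.List.pyRange m n 1).foldl
      (fun rl i =>
        if PySem.List.pyGetD gallery i 0 = -1 then rl
        else rl.set i.toNat
          (max 0 (i - PySem.List.pyGetD gallery i 0), min n (i + PySem.List.pyGetD gallery i 0)))
      ((PySem.List.pyRange 0 m 1).map (pvIntv gallery n)
        ++ (PySem.List.pyRange m n 1).map (fun _ => (0, 0)))
    = (PySem.List.pyRange 0 n 1).map (pvIntv gallery n) := by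
  intro k
  induction k with
  | zero =>
    intro m h0 hn hk
    have hmn : m = n := by omega
    subst hmn
    rw [PySem.List.pyRange_one_eq_nil (le_refl m)]
    simp
  | succ k ih =>
    intro m h0 hn hk
    have hlt : m < n := by omega
    rw [PySem.List.pyRange_one_cons hlt]
    simp only [List.foldl_cons, List.map_cons]
    have hlen : ((PySem.List.pyRange 0 m 1).map (pvIntv gallery n)).length = m.toNat := by
      simp [PySem.List.length_pyRange_one]
    have hset :
        (if PySem.List.pyGetD gallery m 0 = -1 then
          (PySem.List.pyRange 0 m 1).map (pvIntv gallery n)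
            ++ (0,0) :: (PySem.List.pyRange (m+1) n 1).map (fun _ => ((0 : Int), (0 : Int)))
         else
          ((PySem.List.pyRange 0 m 1).map (pvIntv gallery n)
            ++ (0,0) :: (PySem.List.pyRange (m+1) n 1).map (fun _ => ((0 : Int), (0 : Int)))).set
            m.toNat
            (max 0 (m - PySem.List.pyGetD gallery m 0), min n (m + PySem.List.pyGetD gallery m 0)))
        = (PySem.List.pyRange 0 m 1).map (pvIntv gallery n)
            ++ pvIntv gallery n m :: (PySem.List.pyRange (m+1) n 1).map (fun _ => (0,0)) := by
      simp only [pvIntv]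
      split_ifs with hneg
      · rfl
      · rw [List.set_append_right _ _ (by omega)]
        simp [hlen]
    rw [hset]
    have := ih (m + 1) (by omega) (by omega) (by omega)
    rw [PySem.List.pyRange_one_succ_right (a := 0) (b := m) h0] at this
    simpa using this
  
theorem pvBuildA_eq_map (gallery : List Int) (n : Int) :
    pvBuildA gallery n = (PySem.List.pyRange 0 n 1).map (pvIntv gallery n) := by
  by_cases h : 0 ≤ n
  · have := pvBuildA_loop gallery n (n - 0).toNat 0 (le_refl 0) h rfl
    simpa [pvBuildA, PySem.List.pyRange_one_eq_nil (le_refl 0)] using this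
  · unfold pvBuildA
    rw [PySem.List.pyRange_one_eq_nil (by omega)]
    simp

theorem pvBestB_eq_pvMx (L : List (Int × Int)) (pos : Int) : pvBestB L pos = pvMx L pos := by
  unfold pvBestB pvMx
  apply PySem.List.foldl_congr_mem
  intro acc x _
  rcases le_or_gt x.1 pos with h | h <;> rcases le_or_gt x.2 acc with h2 | h2 <;>
    simp_all [max_def] <;> omega

theorem pvMx_perm (L L' : List (Int × Int)) (hp : L.Perm L') (pos : Int) :
    pvMx L pos = pvMx L' pos := by
  unfold pvMx
  haveI : RightCommutative (fun (c : Int) (x : Int × Int) => if x.1 ≤ pos then max c x.2 else c) :=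
    ⟨by
      intro c x y
      show (if y.1 ≤ pos then max (if x.1 ≤ pos then max c x.2 else c) y.2
            else (if x.1 ≤ pos then max c x.2 else c))
          = (if x.1 ≤ pos then max (if y.1 ≤ pos then max c y.2 else c) x.2
            else (if y.1 ≤ pos then max c y.2 else c))
      split_ifs <;> simp [max_assoc, max_comm x.2 y.2]⟩
  exact hp.foldl_eq (-1)

-- after the inner loop, curr is the running max over the consumed prefix
theorem pvInnerA_spec (start : Int) :
    ∀ (rem : List (Int × Int)) (curr : Int),
    ∃ d, rem = d ++ (pvInnerA start rem curr).1 ∧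
      (∀ x ∈ d, x.1 ≤ start) ∧
      (pvInnerA start rem curr).2 = d.foldl (fun c x => max c x.2) curr ∧
      (∀ y t, (pvInnerA start rem curr).1 = y :: t → y.1 > start) := by
  intro rem
  induction rem with
  | nil =>
    intro curr
    exact ⟨[], rfl, by intro y hy; exact absurd hy (by simp), rfl,
      by intro y t hyt; cases hyt⟩
  | cons x rest ih =>
    intro curr
    by_cases hx : x.1 > start
    · refine ⟨[], by simp [pvInnerA, hx], by intro y hy; exact absurd hy (by simp),
        by simp [pvInnerA, hx], ?_⟩
      intro y t hyt
      simp only [pvInnerA, if_pos hx] at hyt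
      cases hyt; omega
    · obtain ⟨d, hd1, hd2, hd3, hd4⟩ := ih (max curr x.2)
      have hrun : pvInnerA start (x :: rest) curr = pvInnerA start rest (max curr x.2) := by
        simp [pvInnerA, hx]
      refine ⟨x :: d, ?_, ?_, ?_, ?_⟩
      · rw [hrun]; simp only [List.cons_append]; exact congrArg _ hd1
      · intro y hy
        rcases List.mem_cons.mp hy with h | h
        · subst h; omega
        · exact hd2 y h
      · rw [hrun, hd3, List.foldl_cons]
      · intro y t hyt; rw [hrun] at hyt; exact hd4 y t hyt

theorem pvMx_split (done rem : List (Int × Int)) (pos : Int)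
    (hdone : ∀ x ∈ done, x.1 ≤ pos) (hrem : ∀ x ∈ rem, x.1 > pos) :
    pvMx (done ++ rem) pos = done.foldl (fun c x => max c x.2) (-1) := by
  unfold pvMx
  rw [List.foldl_append]
  rw [PySem.List.foldl_congr_mem done _ (fun c x => max c x.2) (-1)
    (by intro acc x hx; simp [hdone x hx])]
  rw [PySem.List.foldl_congr_mem rem _ (fun c _ => c) _
    (by intro acc x hx; simp [not_le.mpr (hrem x hx)])]
  exact PySem.List.foldl_ignore _ _

-- the main loop invariant: A's outer loop on the sorted list computes B's sweep on the unsorted one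
theorem pvOuter_eq_sweep (n : Int) (S I : List (Int × Int))
    (hperm : S.Perm I) (hsort : S.Pairwise (fun a b => a.1 ≤ b.1)) :
    ∀ (k : Nat) (start res curr : Int) (done rem : List (Int × Int)),
      k = (n - start).toNat →
      S = done ++ rem →
      (∀ x ∈ done, x.1 ≤ start) →
      curr = done.foldl (fun c x => max c x.2) (-1) →
      pvOuterA n rem start res curr = pvSweepB I n start res := by
  intro k
  induction k using Nat.strong_induction_on with
  | _ k ih =>
    intro start res curr done rem hk hS hdone hcurr
    by_cases hlt : start < n
    · rw [pvOuterA.eq_def, pvSweepB.eq_def, dif_pos hlt, dif_pos hlt]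
      obtain ⟨d, hd1, hd2, hd3, hd4⟩ := pvInnerA_spec start rem curr
      have hdone' : ∀ x ∈ done ++ d, x.1 ≤ start := by
        intro x hx
        rcases List.mem_append.mp hx with h | h
        · exact hdone x h
        · exact hd2 x h
      have hrem' : ∀ x ∈ (pvInnerA start rem curr).1, x.1 > start := by
        intro x hx
        rcases hx' : (pvInnerA start rem curr).1 with _ | ⟨y, t⟩
        · simp [hx'] at hx
        · have hyS : S.Pairwise (fun a b => a.1 ≤ b.1) := hsort
          have hsub : (y :: t).Sublist S := by
            rw [hS, hd1, hx']
            exact (List.sublist_append_right _ _).trans (List.sublist_append_right _ _)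
          have hpt : (y :: t).Pairwise (fun a b => a.1 ≤ b.1) := hyS.sublist hsub
          rw [hx'] at hx
          rcases List.mem_cons.mp hx with h | h
          · subst h; exact hd4 x t hx'
          · have := (List.pairwise_cons.mp hpt).1 x h
            have := hd4 y t hx'
            omega
      have hcurr2 : (pvInnerA start rem curr).2 = pvMx S start := by
        rw [hd3, hcurr, ← List.foldl_append, hS, hd1, ← List.append_assoc]
        exact (pvMx_split (done ++ d) _ start hdone' hrem').symm
      have hbest : pvBestB I start = (pvInnerA start rem curr).2 := by
        rw [pvBestB_eq_pvMx, hcurr2, pvMx_perm S I hperm]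
      rw [← hbest]
      by_cases hret : pvBestB I start < start
      · rw [dif_pos hret, dif_pos hret]
      · rw [dif_neg hret, dif_neg hret]
        have hge : start ≤ pvBestB I start := by omega
        refine ih (n - (pvBestB I start + 1)).toNat (by omega) _ _ _ (done ++ d)
          (pvInnerA start rem curr).1 rfl
          (by rw [List.append_assoc, ← hd1, ← hS]) ?_ ?_
        · intro x hx; have := hdone' x hx; omega
        · rw [hbest, hd3, hcurr, List.foldl_append]
    · rw [pvOuterA.eq_def, pvSweepB.eq_def, dif_neg hlt, dif_neg hlt]

-- ===== VERDICT (by name: the statement is the Claim_ definition above) =====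
theorem min_sprinklers_spec : Claim_equal_min_sprinklers := by
  intro gallery n _ _
  unfold Spec_min_sprinklers min_sprinklers min_sprinklers_alt
  set S := PySem.List.sorted (pvBuildA gallery n) (fun x => x.1) false with hSdef
  have hperm : S.Perm (pvSpansB gallery n) := by
    rw [pvSpansB_eq_map, ← pvBuildA_eq_map]
    exact PySem.List.sorted_perm _ _ _
  have hsort : S.Pairwise (fun a b => a.1 ≤ b.1) :=
    PySem.List.sorted_pairwise _ _
  exact pvOuter_eq_sweep n S (pvSpansB gallery n) hperm hsort (n - 0).toNat 0 0 (-1) [] S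
    rfl rfl (by simp) (by simp)
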